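-- pv_equiv track=rewrite | github.com/d0nk3yhm/pbix-mcp | dax_engine.py | _auto_detect_date_table
-- ===== SOURCE A (Python) =====
-- def _auto_detect_date_table(tables: dict) -> str:
--     """Auto-detect the date/calendar dimension table from available tables."""
--     # Pass 1: table name contains 'date' and has a 'Date' column
--     for tname, tdata in tables.items():
--         if 'date' in tname.lower() and 'Date' in tdata.get('columns', []):
--             return tname
--     # Pass 2: common date-table prefixes (dimDate, DimDate, Calendar, etc.)
--     for tname, tdata in tables.items():
--         tlow = tname.lower().replace(' ', '').replace('-', '').replace('_', '')
--         if tlow in ('dimdate', 'datetable', 'calendar', 'datekey', 'dates'):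
--             for cname in tdata.get('columns', []):
--                 if cname.lower() == 'date':
--                     return tname
--     # Pass 3: any table with Date + Year/Month columns (likely a date dimension)
--     for tname, tdata in tables.items():
--         cols_lower = [c.lower() for c in tdata.get('columns', [])]
--         if 'date' in cols_lower and ('year' in cols_lower or 'month' in cols_lower):
--             return tname
--     return 'dim-Date'  # fallback default
-- ===== SOURCE B (Python) =====
-- def _auto_detect_date_table(tables: dict) -> str:
--     """Single pass: record the first table satisfying each tier, then pick by priority."""
--     t1 = t2 = t3 = None
--     for tname, tdata in tables.items():
--         cols = tdata.get('columns', [])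
--         if t1 is None and 'date' in tname.lower() and 'Date' in cols:
--             t1 = tname
--         if t2 is None:
--             tlow = tname.lower().replace(' ', '').replace('-', '').replace('_', '')
--             if tlow in ('dimdate', 'datetable', 'calendar', 'datekey', 'dates') \
--                     and any(c.lower() == 'date' for c in cols):
--                 t2 = tname
--         if t3 is None:
--             cl = [c.lower() for c in cols]
--             if 'date' in cl and ('year' in cl or 'month' in cl):
--                 t3 = tname
--     if t1 is not None:
--         return t1
--     if t2 is not None:
--         return t2
--     if t3 is not None:
--         return t3
--     return 'dim-Date'
-- ===== Notes on version B (the rewrite author's own statement) =====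
-- stated objective: alternative
-- what changed: Replaces A's three sequential full scans (one per priority tier) with a single pass over the tables that records the first match for each tier in three slots, then returns the highest-priority slot set.
import Mathlib
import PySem

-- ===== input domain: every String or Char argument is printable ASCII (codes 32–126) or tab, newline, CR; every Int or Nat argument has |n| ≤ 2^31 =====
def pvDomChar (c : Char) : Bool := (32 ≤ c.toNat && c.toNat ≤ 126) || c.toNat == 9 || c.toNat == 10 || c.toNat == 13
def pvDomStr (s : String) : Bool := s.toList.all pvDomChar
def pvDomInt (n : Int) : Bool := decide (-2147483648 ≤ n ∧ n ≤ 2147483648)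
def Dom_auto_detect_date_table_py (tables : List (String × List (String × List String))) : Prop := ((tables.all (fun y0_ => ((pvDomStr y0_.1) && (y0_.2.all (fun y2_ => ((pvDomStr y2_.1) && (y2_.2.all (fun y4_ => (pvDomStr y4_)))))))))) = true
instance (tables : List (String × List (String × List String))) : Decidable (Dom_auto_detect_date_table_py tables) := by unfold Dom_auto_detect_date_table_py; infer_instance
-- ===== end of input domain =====

-- B folds the three first-match passes of A into ONE pass that records the first
-- table matching each tier, then selects by priority (objective: alternative decomposition).

-- ===== PORT A =====
-- tdata.get('columns', []) on the dict tdata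
def pvCols (tdata : List (String × List String)) : List String :=
  PySem.Dict.getD (PySem.Dict.mk tdata) "columns" []

-- Pass 1: name contains 'date' and columns contain 'Date' (first match)
def pvPass1 : List (String × List (String × List String)) → Option String
  | [] => none
  | (tname, tdata) :: rest =>
    if PySem.Str.isIn "date" (PySem.Str.lower tname) && (pvCols tdata).contains "Date"
    then some tname else pvPass1 rest

-- inner for-loop of pass 2: return tname at the first column whose .lower() is 'date'
def pvPass2Inner (tname : String) : List String → Option String
  | [] => none
  | cname :: rest =>
    if PySem.Str.lower cname == "date" then some tname else pvPass2Inner tname rest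

def pvPass2 : List (String × List (String × List String)) → Option String
  | [] => none
  | (tname, tdata) :: rest =>
    let tlow := PySem.Str.replace (PySem.Str.replace (PySem.Str.replace (PySem.Str.lower tname) " " "") "-" "") "_" ""
    if ["dimdate", "datetable", "calendar", "datekey", "dates"].contains tlow then
      match pvPass2Inner tname (pvCols tdata) with
      | some t => some t
      | none => pvPass2 rest
    else pvPass2 rest

def pvPass3 : List (String × List (String × List String)) → Option String
  | [] => none
  | (tname, tdata) :: rest =>
    let cols_lower := (pvCols tdata).map PySem.Str.lower
    if cols_lower.contains "date" && (cols_lower.contains "year" || cols_lower.contains "month")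
    then some tname else pvPass3 rest

def auto_detect_date_table_py (tables : List (String × List (String × List String))) : String :=
  match pvPass1 tables with
  | some t => t
  | none =>
    match pvPass2 tables with
    | some t => t
    | none =>
      match pvPass3 tables with
      | some t => t
      | none => "dim-Date"

-- ===== PORT B =====
-- one loop body: update the three first-match slots, never overwriting
def pvStepB (s : Option String × Option String × Option String)
    (p : String × List (String × List String)) :
    Option String × Option String × Option String :=
  let tname := p.1
  let cols := pvCols p.2
  let t1 := if s.1.isNone && (PySem.Str.isIn "date" (PySem.Str.lower tname) && cols.contains "Date")
            then some tname else s.1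
  let t2 := if s.2.1.isNone then
              (let tlow := PySem.Str.replace (PySem.Str.replace (PySem.Str.replace (PySem.Str.lower tname) " " "") "-" "") "_" ""
               if ["dimdate", "datetable", "calendar", "datekey", "dates"].contains tlow
                  && cols.any (fun c => PySem.Str.lower c == "date")
               then some tname else s.2.1)
            else s.2.1
  let t3 := if s.2.2.isNone then
              (let cl := cols.map PySem.Str.lower
               if cl.contains "date" && (cl.contains "year" || cl.contains "month")
               then some tname else s.2.2)
            else s.2.2
  (t1, t2, t3)

def auto_detect_date_table_py_alt (tables : List (String × List (String × List String))) : String :=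
  let s := tables.foldl pvStepB (none, none, none)
  match s.1 with
  | some t => t
  | none =>
    match s.2.1 with
    | some t => t
    | none =>
      match s.2.2 with
      | some t => t
      | none => "dim-Date"

-- ===== PRECONDITION & SPEC =====
def Spec_auto_detect_date_table_py (tables : List (String × List (String × List String))) (out : String) : Prop := out = auto_detect_date_table_py_alt tables
instance (tables : List (String × List (String × List String))) (out : String) : Decidable (Spec_auto_detect_date_table_py tables out) := by unfold Spec_auto_detect_date_table_py; infer_instance

-- ===== CLAIM (what is proved, stated in full; the proofs are below) =====
def Claim_equal_auto_detect_date_table_py : Prop := ∀ (tables : List (String × List (String × List String))), Dom_auto_detect_date_table_py tables → Spec_auto_detect_date_table_py tables (auto_detect_date_table_py tables)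

-- ===== LEMMAS AND PROOFS =====

-- A's pass-2 inner loop = B's List.any over the same columns
theorem pvPass2Inner_eq_any (tname : String) (cols : List String) :
    pvPass2Inner tname cols = (if cols.any (fun c => PySem.Str.lower c == "date") then some tname else none) := by
  induction cols with
  | nil => rfl
  | cons c rest ih =>
    simp only [pvPass2Inner, List.any_cons, ih]
    by_cases h : PySem.Str.lower c == "date" <;> simp [h]

-- slot update shape shared by B's three tiers: set only if still unset and the condition holds
def pvUpd (o : Option String) (cond : Bool) (t : String) : Option String :=
  if o.isNone && cond then some t else o

theorem pvUpd_or (o : Option String) (cond : Bool) (t : String) (r : Option String) :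
    (pvUpd o cond t).or r = o.or (if cond then some t else r) := by
  cases o <;> cases cond <;> simp [pvUpd]

-- one B step = the three slot updates
theorem pvStepB_eq (a b c : Option String) (tname : String) (tdata : List (String × List String)) :
    pvStepB (a, b, c) (tname, tdata) =
      (pvUpd a (PySem.Str.isIn "date" (PySem.Str.lower tname) && (pvCols tdata).contains "Date") tname,
       pvUpd b (["dimdate", "datetable", "calendar", "datekey", "dates"].contains
            (PySem.Str.replace (PySem.Str.replace (PySem.Str.replace (PySem.Str.lower tname) " " "") "-" "") "_" "")
          && (pvCols tdata).any (fun c => PySem.Str.lower c == "date")) tname,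
       pvUpd c ((let cl := (pvCols tdata).map PySem.Str.lower
          cl.contains "date" && (cl.contains "year" || cl.contains "month"))) tname) := by
  cases a <;> cases b <;> cases c <;> simp [pvStepB, pvUpd]

-- A's pass-2 head step
theorem pvPass2_cons (tname : String) (tdata : List (String × List String))
    (rest : List (String × List (String × List String))) :
    pvPass2 ((tname, tdata) :: rest) =
      if ["dimdate", "datetable", "calendar", "datekey", "dates"].contains
            (PySem.Str.replace (PySem.Str.replace (PySem.Str.replace (PySem.Str.lower tname) " " "") "-" "") "_" "")
          && (pvCols tdata).any (fun c => PySem.Str.lower c == "date")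
      then some tname else pvPass2 rest := by
  simp only [pvPass2, pvPass2Inner_eq_any]
  generalize (["dimdate", "datetable", "calendar", "datekey", "dates"] : List String).contains
      (PySem.Str.replace (PySem.Str.replace (PySem.Str.replace (PySem.Str.lower tname) " " "") "-" "") "_" "") = pre
  generalize ((pvCols tdata).any fun c => PySem.Str.lower c == "date") = hasDate
  cases pre <;> cases hasDate <;> simp

-- B's fold from an arbitrary state = state-or-else A's three pass results
theorem pvFold_eq (tables : List (String × List (String × List String)))
    (a b c : Option String) :
    tables.foldl pvStepB (a, b, c) =
      (a.or (pvPass1 tables), b.or (pvPass2 tables), c.or (pvPass3 tables)) := by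
  induction tables generalizing a b c with
  | nil => simp [pvPass1, pvPass2, pvPass3]
  | cons p rest ih =>
    obtain ⟨tname, tdata⟩ := p
    rw [List.foldl_cons, pvStepB_eq, ih, pvPass2_cons]
    show _ = (a.or (pvPass1 ((tname, tdata) :: rest)), _, c.or (pvPass3 ((tname, tdata) :: rest)))
    simp only [pvPass1, pvPass3, pvUpd_or]

-- ===== VERDICT (by name: the statement is the Claim_ definition above) =====
theorem auto_detect_date_table_py_spec : Claim_equal_auto_detect_date_table_py := by
  intro tables _
  unfold Spec_auto_detect_date_table_py auto_detect_date_table_py auto_detect_date_table_py_alt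
  rw [pvFold_eq]
  simp only [Option.none_or]
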